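-- pv_equiv track=rewrite | github.com/wilmurillo-ai/Design-Assistant | .skills/openclaw-skills/skills/footya/arch-diagrammer/scripts/render_kroki.py | detect_format_from_output
-- ===== SOURCE A (Python) =====
-- def detect_format_from_output(out_path: str | None, requested_format: str | None) -> str:
--     if requested_format:
--         return requested_format
--     if out_path:
--         lower = out_path.lower()
--         for ext, fmt in ((".svg", "svg"), (".png", "png"), (".pdf", "pdf"), (".jpeg", "jpeg"), (".jpg", "jpeg")):
--             if lower.endswith(ext):
--                 return fmt
--         if lower.endswith(".html") or lower.endswith(".htm"):
--             return "html"
--     return "svg"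
-- ===== SOURCE B (Python) =====
-- _FMT_BY_EXT = {"svg": "svg", "png": "png", "pdf": "pdf", "jpeg": "jpeg",
--                "jpg": "jpeg", "html": "html", "htm": "html"}
--
--
-- def detect_format_from_output(out_path, requested_format):
--     if requested_format:
--         return requested_format
--     if out_path:
--         _stem, dot, ext = out_path.lower().rpartition(".")
--         if dot:
--             return _FMT_BY_EXT.get(ext, "svg")
--     return "svg"
-- ===== Notes on version B (the rewrite author's own statement) =====
-- stated objective: idiomatic
-- what changed: Replaces the ordered scan of endswith suffix tests (plus the extra html/htm branch) by a single rpartition('.') extension extraction and one dict lookup keyed by the lowercased extension.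
import Mathlib
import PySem

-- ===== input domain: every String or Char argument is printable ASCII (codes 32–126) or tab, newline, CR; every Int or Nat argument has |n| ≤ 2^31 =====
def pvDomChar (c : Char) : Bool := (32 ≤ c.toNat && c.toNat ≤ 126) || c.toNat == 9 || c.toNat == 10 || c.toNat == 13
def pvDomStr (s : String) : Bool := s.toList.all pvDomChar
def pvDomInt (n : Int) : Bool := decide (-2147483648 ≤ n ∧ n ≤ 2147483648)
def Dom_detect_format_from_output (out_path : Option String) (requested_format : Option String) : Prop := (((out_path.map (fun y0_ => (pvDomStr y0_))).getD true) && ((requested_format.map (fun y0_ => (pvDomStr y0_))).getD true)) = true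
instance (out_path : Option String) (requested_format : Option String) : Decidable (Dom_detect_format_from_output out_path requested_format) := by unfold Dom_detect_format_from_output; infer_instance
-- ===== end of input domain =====

-- B replaces A's ordered chain of endswith tests by one rpartition('.') extension
-- extraction and a single dict lookup (idiomatic; return values proved identical).

-- Python truthiness of an Optional[str]: None and "" are falsy
def pvTruthy (o : Option String) : Bool :=
  match o with
  | some s => s ≠ ""
  | none => false

-- ===== PORT A =====
def detect_format_from_output (out_path : Option String) (requested_format : Option String) : String :=
  if pvTruthy requested_format then requested_format.getD ""
  else if pvTruthy out_path then
    let lower := PySem.Str.lower (out_path.getD "")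
    if PySem.Str.endswith lower ".svg" then "svg"
    else if PySem.Str.endswith lower ".png" then "png"
    else if PySem.Str.endswith lower ".pdf" then "pdf"
    else if PySem.Str.endswith lower ".jpeg" then "jpeg"
    else if PySem.Str.endswith lower ".jpg" then "jpeg"
    else if PySem.Str.endswith lower ".html" || PySem.Str.endswith lower ".htm" then "html"
    else "svg"
  else "svg"

-- ===== PORT B =====
-- hand port of str.rpartition(".") restricted to what B uses: (did the separator
-- occur, the part after the last '.'); exact for a one-character separator
def pvRPartDot (l : List Char) : Bool × List Char :=
  let rev := l.reverse
  let extRev := rev.takeWhile (fun c => c != '.')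
  (extRev.length < rev.length, extRev.reverse)

def pvFmtByExt : PySem.Dict String String :=
  PySem.Dict.ofList [("svg", "svg"), ("png", "png"), ("pdf", "pdf"), ("jpeg", "jpeg"),
                     ("jpg", "jpeg"), ("html", "html"), ("htm", "html")]

def detect_format_from_output_alt (out_path : Option String) (requested_format : Option String) : String :=
  if pvTruthy requested_format then requested_format.getD ""
  else if pvTruthy out_path then
    let p := pvRPartDot (PySem.Str.lower (out_path.getD "")).toList
    if p.1 then pvFmtByExt.getD (String.ofList p.2) "svg"
    else "svg"
  else "svg"

-- ===== PRECONDITION & SPEC =====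
def Spec_detect_format_from_output (out_path : Option String) (requested_format : Option String) (out : String) : Prop := out = detect_format_from_output_alt out_path requested_format
instance (out_path : Option String) (requested_format : Option String) (out : String) : Decidable (Spec_detect_format_from_output out_path requested_format out) := by unfold Spec_detect_format_from_output; infer_instance

-- ===== CLAIM (what is proved, stated in full; the proofs are below) =====
def Claim_equal_detect_format_from_output : Prop := ∀ (out_path : Option String) (requested_format : Option String), Dom_detect_format_from_output out_path requested_format → Spec_detect_format_from_output out_path requested_format (detect_format_from_output out_path requested_format)

-- ===== LEMMAS AND PROOFS =====

-- takeWhile passes a dot-free block and stops at the '.' that follows it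
theorem pv_takeWhile_dotfree (u v : List Char) (hu : ∀ c ∈ u, c ≠ '.') :
    (u ++ '.' :: v).takeWhile (fun c => c != '.') = u := by
  induction u with
  | nil => simp
  | cons a t ih =>
      have ha : a ≠ '.' := hu a (by simp)
      simp only [List.cons_append, List.takeWhile_cons]
      rw [if_pos (by simpa using ha)]
      rw [ih (fun c hc => hu c (by simp [hc]))]

-- the key characterisation: for a dot-free w, l ends with '.'::w iff rpartition's
-- separator flag is set and its tail part is exactly w
theorem pv_endswith_iff (l w : List Char) (hw : ∀ c ∈ w, c ≠ '.') :
    PySem.Chars.endswith l ('.' :: w) = true ↔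
      ((pvRPartDot l).1 = true ∧ (pvRPartDot l).2 = w) := by
  have hrev : ∀ c ∈ w.reverse, c ≠ '.' := fun c hc => hw c (by simpa using hc)
  rw [PySem.Chars.endswith_iff]
  constructor
  · intro hsuf
    obtain ⟨pre, hpre⟩ := hsuf
    have hr : l.reverse = w.reverse ++ '.' :: pre.reverse := by
      rw [← hpre]; simp
    refine ⟨?_, ?_⟩
    · simp only [pvRPartDot, hr, pv_takeWhile_dotfree _ _ hrev, decide_eq_true_eq]
      simp
    · simp only [pvRPartDot, hr, pv_takeWhile_dotfree _ _ hrev]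
      simp
  · rintro ⟨h1, h2⟩
    simp only [pvRPartDot, decide_eq_true_eq] at h1 h2
    have ht2 : l.reverse.takeWhile (fun c => c != '.') = w.reverse := by
      have := congrArg List.reverse h2
      simpa using this
    have hsplit : l.reverse.takeWhile (fun c => c != '.') ++
        l.reverse.dropWhile (fun c => c != '.') = l.reverse :=
      List.takeWhile_append_dropWhile
    have hdne : l.reverse.dropWhile (fun c => c != '.') ≠ [] := by
      intro hnil
      rw [hnil, List.append_nil] at hsplit
      rw [hsplit] at h1
      omega
    obtain ⟨a, rest, hd⟩ : ∃ a rest, l.reverse.dropWhile (fun c => c != '.') = a :: rest := by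
      cases hx : l.reverse.dropWhile (fun c => c != '.') with
      | nil => exact absurd hx hdne
      | cons a rest => exact ⟨a, rest, rfl⟩
    have ha : a = '.' := by
      have := List.head_dropWhile_not (fun c => c != '.') hdne
      simp only [hd, List.head_cons] at this
      simpa using this
    have hr : l.reverse = w.reverse ++ '.' :: rest := by
      rw [← hsplit, ht2, hd, ha]
    refine ⟨rest.reverse, ?_⟩
    have h := congrArg List.reverse hr
    simp at h
    exact h.symm

-- evaluating B's dict lookup, key by key
theorem pv_beq_key (k : String) (e : List Char) :
    (k == String.ofList e) = decide (e = k.toList) := by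
  by_cases h : e = k.toList
  · subst h
    simp [String.ofList_toList]
  · have hne : k ≠ String.ofList e := by
      intro hc
      apply h
      have := congrArg String.toList hc
      simpa using this.symm
    simp [h, hne]

theorem pv_lookup (e : List Char) :
    pvFmtByExt.getD (String.ofList e) "svg" =
      (if e = ['s','v','g'] then "svg"
       else if e = ['p','n','g'] then "png"
       else if e = ['p','d','f'] then "pdf"
       else if e = ['j','p','e','g'] then "jpeg"
       else if e = ['j','p','g'] then "jpeg"
       else if e = ['h','t','m','l'] then "html"
       else if e = ['h','t','m'] then "html"
       else "svg") := by
  have hd : pvFmtByExt = PySem.Dict.mk [("svg", "svg"), ("png", "png"), ("pdf", "pdf"),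
      ("jpeg", "jpeg"), ("jpg", "jpeg"), ("html", "html"), ("htm", "html")] := by decide
  have t1 : "svg".toList = ['s','v','g'] := by rw [show ("svg" : String) = String.ofList ['s','v','g'] from by decide, String.toList_ofList]
  have t2 : "png".toList = ['p','n','g'] := by rw [show ("png" : String) = String.ofList ['p','n','g'] from by decide, String.toList_ofList]
  have t3 : "pdf".toList = ['p','d','f'] := by rw [show ("pdf" : String) = String.ofList ['p','d','f'] from by decide, String.toList_ofList]
  have t4 : "jpeg".toList = ['j','p','e','g'] := by rw [show ("jpeg" : String) = String.ofList ['j','p','e','g'] from by decide, String.toList_ofList]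
  have t5 : "jpg".toList = ['j','p','g'] := by rw [show ("jpg" : String) = String.ofList ['j','p','g'] from by decide, String.toList_ofList]
  have t6 : "html".toList = ['h','t','m','l'] := by rw [show ("html" : String) = String.ofList ['h','t','m','l'] from by decide, String.toList_ofList]
  have t7 : "htm".toList = ['h','t','m'] := by rw [show ("htm" : String) = String.ofList ['h','t','m'] from by decide, String.toList_ofList]
  rw [hd, PySem.Dict.getD_eq_get?_getD]
  simp only [PySem.Dict.get?_mk_cons, pv_beq_key, t1, t2, t3, t4, t5, t6, t7]
  by_cases h1 : e = ['s','v','g']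
  · simp [h1]
  · by_cases h2 : e = ['p','n','g']
    · simp [h2]
    · by_cases h3 : e = ['p','d','f']
      · simp [h3]
      · by_cases h4 : e = ['j','p','e','g']
        · simp [h4]
        · by_cases h5 : e = ['j','p','g']
          · simp [h5]
          · by_cases h6 : e = ['h','t','m','l']
            · simp [h6]
            · by_cases h7 : e = ['h','t','m']
              · simp [h7]
              · simp [h1, h2, h3, h4, h5, h6, h7, PySem.Dict.get?]

-- A's endswith chain equals B's flag + lookup, for every lowered character list
theorem pv_core (l : List Char) :
    (if PySem.Chars.endswith l ".svg".toList then "svg"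
     else if PySem.Chars.endswith l ".png".toList then "png"
     else if PySem.Chars.endswith l ".pdf".toList then "pdf"
     else if PySem.Chars.endswith l ".jpeg".toList then "jpeg"
     else if PySem.Chars.endswith l ".jpg".toList then "jpeg"
     else if PySem.Chars.endswith l ".html".toList || PySem.Chars.endswith l ".htm".toList then "html"
     else "svg")
    = (if (pvRPartDot l).1 then pvFmtByExt.getD (String.ofList (pvRPartDot l).2) "svg"
       else "svg") := by
  have hsvg : PySem.Chars.endswith l ".svg".toList = true ↔
      ((pvRPartDot l).1 = true ∧ (pvRPartDot l).2 = ['s','v','g']) := by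
    rw [show (".svg" : String) = String.ofList ('.' :: ['s','v','g']) from by decide, String.toList_ofList]
    exact pv_endswith_iff l ['s','v','g'] (by simp)
  have hpng : PySem.Chars.endswith l ".png".toList = true ↔
      ((pvRPartDot l).1 = true ∧ (pvRPartDot l).2 = ['p','n','g']) := by
    rw [show (".png" : String) = String.ofList ('.' :: ['p','n','g']) from by decide, String.toList_ofList]
    exact pv_endswith_iff l ['p','n','g'] (by simp)
  have hpdf : PySem.Chars.endswith l ".pdf".toList = true ↔
      ((pvRPartDot l).1 = true ∧ (pvRPartDot l).2 = ['p','d','f']) := by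
    rw [show (".pdf" : String) = String.ofList ('.' :: ['p','d','f']) from by decide, String.toList_ofList]
    exact pv_endswith_iff l ['p','d','f'] (by simp)
  have hjpeg : PySem.Chars.endswith l ".jpeg".toList = true ↔
      ((pvRPartDot l).1 = true ∧ (pvRPartDot l).2 = ['j','p','e','g']) := by
    rw [show (".jpeg" : String) = String.ofList ('.' :: ['j','p','e','g']) from by decide, String.toList_ofList]
    exact pv_endswith_iff l ['j','p','e','g'] (by simp)
  have hjpg : PySem.Chars.endswith l ".jpg".toList = true ↔
      ((pvRPartDot l).1 = true ∧ (pvRPartDot l).2 = ['j','p','g']) := by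
    rw [show (".jpg" : String) = String.ofList ('.' :: ['j','p','g']) from by decide, String.toList_ofList]
    exact pv_endswith_iff l ['j','p','g'] (by simp)
  have hhtml : PySem.Chars.endswith l ".html".toList = true ↔
      ((pvRPartDot l).1 = true ∧ (pvRPartDot l).2 = ['h','t','m','l']) := by
    rw [show (".html" : String) = String.ofList ('.' :: ['h','t','m','l']) from by decide, String.toList_ofList]
    exact pv_endswith_iff l ['h','t','m','l'] (by simp)
  have hhtm : PySem.Chars.endswith l ".htm".toList = true ↔
      ((pvRPartDot l).1 = true ∧ (pvRPartDot l).2 = ['h','t','m']) := by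
    rw [show (".htm" : String) = String.ofList ('.' :: ['h','t','m']) from by decide, String.toList_ofList]
    exact pv_endswith_iff l ['h','t','m'] (by simp)
  rw [pv_lookup]
  by_cases hflag : (pvRPartDot l).1 = true
  · simp only [hflag, true_and] at hsvg hpng hpdf hjpeg hjpg hhtml hhtm
    simp only [Bool.or_eq_true, hsvg, hpng, hpdf, hjpeg, hjpg, hhtml, hhtm, hflag, if_true]
    split_ifs <;> simp_all
  · have hf : (pvRPartDot l).1 = false := by
      cases h : (pvRPartDot l).1
      · rfl
      · exact absurd h hflag
    simp only [Bool.or_eq_true, hsvg, hpng, hpdf, hjpeg, hjpg, hhtml, hhtm, hf]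
    simp

-- ===== VERDICT (by name: the statement is the Claim_ definition above) =====
theorem detect_format_from_output_spec : Claim_equal_detect_format_from_output := by
  intro out_path requested_format _
  unfold Spec_detect_format_from_output detect_format_from_output detect_format_from_output_alt
  by_cases hr : pvTruthy requested_format = true
  · rw [if_pos hr, if_pos hr]
  · rw [if_neg hr, if_neg hr]
    by_cases ho : pvTruthy out_path = true
    · rw [if_pos ho, if_pos ho]
      have := pv_core (PySem.Str.lower (out_path.getD "")).toList
      simpa [PySem.Str.endswith] using this
    · rw [if_neg ho, if_neg ho]
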